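-- pv_equiv track=rewrite | github.com/nmgzzy/knowledge_base | kb/tree.py | _format_tree
-- ===== SOURCE A (Python) =====
-- from typing import Any, Optional
--
-- def _format_tree(root_label: str, rel_files: list[str]) -> str:
--     root: dict[str, Any] = {"_files": [], "_dirs": {}}
--     for rel in rel_files:
--         parts = [p for p in rel.split("/") if p]
--         if not parts:
--             continue
--         node = root
--         for part in parts[:-1]:
--             node = node["_dirs"].setdefault(part, {"_files": [], "_dirs": {}})
--         node["_files"].append(parts[-1])
--
--     def render(node: dict[str, Any], prefix: str) -> list[str]:
--         out: list[str] = []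
--         dirnames = sorted(node["_dirs"].keys())
--         filenames = sorted(node["_files"])
--         entries: list[tuple[str, str]] = [("dir", n) for n in dirnames] + [("file", f) for f in filenames]
--         for i, (kind, name) in enumerate(entries):
--             is_last = i == len(entries) - 1
--             branch = "└── " if is_last else "├── "
--             out.append(prefix + branch + (name + "/" if kind == "dir" else name))
--             if kind == "dir":
--                 child_prefix = prefix + ("    " if is_last else "│   ")
--                 out.extend(render(node["_dirs"][name], child_prefix))
--         return out
--
--     lines = [root_label + "/"]
--     lines.extend(render(root, ""))
--     return "\n".join(lines)
-- ===== SOURCE B (Python) =====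
-- # B: no intermediate tree structure; one recursive pass that groups the split
-- # path suffixes by their first component and emits lines directly.
-- def _format_tree(root_label: str, rel_files: list[str]) -> str:
--     lines = [root_label + "/"]
--
--     def render(paths: list[list[str]], prefix: str) -> None:
--         files = sorted(p[0] for p in paths if len(p) == 1)
--         groups: dict[str, list[list[str]]] = {}
--         for p in paths:
--             if len(p) > 1:
--                 groups[p[0]] = groups.get(p[0], []) + [p[1:]]
--         dirs = sorted(groups)
--         total = len(dirs) + len(files)
--         for i, d in enumerate(dirs):
--             last = i == total - 1
--             lines.append(prefix + ("└── " if last else "├── ") + d + "/")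
--             render(groups[d], prefix + ("    " if last else "│   "))
--         for j, f in enumerate(files):
--             last = len(dirs) + j == total - 1
--             lines.append(prefix + ("└── " if last else "├── ") + f)
--
--     render([q for q in ([p for p in rel.split("/") if p] for rel in rel_files) if q], "")
--     return "\n".join(lines)
-- ===== Notes on version B (the rewrite author's own statement) =====
-- stated objective: alternative
-- what changed: B never builds A's nested {'_files','_dirs'} tree: it splits the paths once and renders by recursively grouping path suffixes by their first component, emitting lines directly.
import Mathlib
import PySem

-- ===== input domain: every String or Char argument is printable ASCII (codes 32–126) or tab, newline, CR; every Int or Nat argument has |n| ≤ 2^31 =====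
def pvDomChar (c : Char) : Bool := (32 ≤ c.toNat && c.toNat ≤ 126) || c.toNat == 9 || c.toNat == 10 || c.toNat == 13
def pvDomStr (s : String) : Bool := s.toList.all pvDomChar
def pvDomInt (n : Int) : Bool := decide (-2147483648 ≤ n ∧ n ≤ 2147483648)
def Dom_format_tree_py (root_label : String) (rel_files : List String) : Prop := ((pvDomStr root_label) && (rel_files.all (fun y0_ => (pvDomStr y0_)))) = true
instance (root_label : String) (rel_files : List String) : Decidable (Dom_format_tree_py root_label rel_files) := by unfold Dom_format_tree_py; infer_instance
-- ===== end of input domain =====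

-- B builds no tree at all: it recursively groups the split path suffixes by first
-- component and emits the lines directly (objective: alternative algorithm/data layout).

-- ===== PORT A =====
-- The nested Python dict {"_files": list, "_dirs": dict} becomes a mutual inductive;
-- "_dirs" is kept in insertion order (PEntries is an association list, keys unique by construction).
mutual
inductive PTree : Type where
  | mk : List String → PEntries → PTree
inductive PEntries : Type where
  | nil : PEntries
  | cons : String → PTree → PEntries → PEntries
end

mutual
def psize : PTree → Nat
  | .mk files es => 1 + files.length + esize es
def esize : PEntries → Nat
  | .nil => 0
  | .cons _ t rest => 1 + psize t + esize rest
end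

def toAssoc : PEntries → List (String × PTree)
  | .nil => []
  | .cons k t rest => (k, t) :: toAssoc rest

-- [p for p in rel.split("/") if p]  ("/" is a nonempty literal, so split? is always some)
def splitParts (rel : String) : List String :=
  ((PySem.Str.split? rel "/").getD []).filter (fun p => p ≠ "")

-- the walk `for part in parts[:-1]: node = node["_dirs"].setdefault(part, …)` followed by
-- `node["_files"].append(parts[-1])`, written as functional recursion on the path
mutual
def addPath : PTree → List String → PTree
  | t, [] => t
  | .mk files dirs, [f] => .mk (files ++ [f]) dirs
  | .mk files dirs, d :: p :: rest => .mk files (setdef dirs d (p :: rest))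
  termination_by _ parts => (parts.length, 0)
  decreasing_by apply Prod.Lex.left; simp
def setdef : PEntries → String → List String → PEntries
  | .nil, d, rest => .cons d (addPath (.mk [] .nil) rest) .nil
  | .cons k t es, d, rest =>
      if k = d then .cons k (addPath t rest) es else .cons k t (setdef es d rest)
  termination_by es _ rest => (rest.length, 1 + esize es)
  decreasing_by
    · apply Prod.Lex.right; omega
    · apply Prod.Lex.right; omega
    · apply Prod.Lex.right; simp [esize]
end

def buildTree (rel_files : List String) : PTree :=
  rel_files.foldl (fun root rel =>
    let parts := splitParts rel
    if parts = [] then root else addPath root parts) (PTree.mk [] PEntries.nil)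

-- entries = [("dir", n) for n in sorted(dirs)] + [("file", f) for f in sorted(files)];
-- keys are unique, so sorting the (key, subtree) pairs by key carries the later
-- node["_dirs"][name] lookup along with the sorted key (some = dir, none = file).
def entriesOf : PTree → List (String × Option PTree)
  | .mk files dirs =>
    (PySem.List.sorted (toAssoc dirs) (fun p => p.1) false).map (fun p => (p.1, some p.2))
      ++ (PySem.List.sorted files (fun f => f) false).map (fun f => (f, (none : Option PTree)))

def optW : Option PTree → Nat
  | none => 0
  | some t => psize t

def lmeasure (es : List (String × Option PTree)) : Nat :=
  (es.map (fun e => 1 + optW e.2)).sum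

theorem lmeasure_cons (e : String × Option PTree) (es : List (String × Option PTree)) :
    lmeasure (e :: es) = 1 + optW e.2 + lmeasure es := by
  simp [lmeasure, Nat.add_assoc]

theorem sum_toAssoc (es : PEntries) :
    ((toAssoc es).map (fun p => 1 + psize p.2)).sum = esize es :=
  match es with
  | .nil => by simp [toAssoc, esize]
  | .cons k t rest => by
      simp [toAssoc, esize, sum_toAssoc rest]
termination_by esize es
decreasing_by simp [esize]

theorem lmeasure_append (a b : List (String × Option PTree)) :
    lmeasure (a ++ b) = lmeasure a + lmeasure b := by
  simp [lmeasure]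

theorem lmeasure_map_file (fs : List String) :
    lmeasure (fs.map (fun f => (f, (none : Option PTree)))) = fs.length := by
  induction fs with
  | nil => simp [lmeasure]
  | cons f fs ih => simp [lmeasure, optW] at ih ⊢; omega

theorem lmeasure_map_dir (ps : List (String × PTree)) :
    lmeasure (ps.map (fun p => (p.1, some p.2))) = (ps.map (fun p => 1 + psize p.2)).sum := by
  induction ps with
  | nil => simp [lmeasure]
  | cons p ps ih => simp [lmeasure, optW] at ih ⊢; omega

-- used by the termination proofs of the render
theorem lmeasure_entriesOf (t : PTree) : lmeasure (entriesOf t) < psize t := by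
  cases t with
  | mk files dirs =>
    have hperm : ((PySem.List.sorted (toAssoc dirs) (fun p => p.1) false).map
        (fun p => 1 + psize p.2)).sum = ((toAssoc dirs).map (fun p => 1 + psize p.2)).sum :=
      ((PySem.List.sorted_perm (toAssoc dirs) (fun p => p.1) false).map _).sum_eq
    have hlen : (PySem.List.sorted files (fun f => f) false).length = files.length :=
      (PySem.List.sorted_perm files (fun f => f) false).length_eq
    rw [entriesOf, lmeasure_append, lmeasure_map_dir, lmeasure_map_file, hperm, sum_toAssoc,
      hlen, psize]
    omega

-- render(node, prefix): entriesOf computes the entries, renderEntries is the enumerate loop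
-- (i == len(entries) - 1 is rendered as "no entries remain after this one")
mutual
def renderA : PTree → String → List String
  | t, pre => renderEntries (entriesOf t) pre
  termination_by t _ => psize t
  decreasing_by exact lmeasure_entriesOf t
def renderEntries : List (String × Option PTree) → String → List String
  | [], _ => []
  | (name, o) :: rest, pre =>
    let isLast := rest.isEmpty
    let branch := if isLast then "└── " else "├── "
    (match o with
     | none => [pre ++ branch ++ name]
     | some c => (pre ++ branch ++ name ++ "/") :: renderA c (pre ++ (if isLast then "    " else "│   ")))
      ++ renderEntries rest pre
  termination_by es _ => lmeasure es
  decreasing_by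
    · have := lmeasure_cons (name, some c) rest
      simp [optW] at this; omega
    · have := lmeasure_cons (name, o) rest; omega
end

def format_tree_py (root_label : String) (rel_files : List String) : String :=
  let root := buildTree rel_files
  PySem.Str.join "\n" ((root_label ++ "/") :: renderA root "")

-- ===== PORT B =====
-- ([p for p in rel.split("/") if p] is the same expression as in A: splitParts is reused)
-- sorted(p[0] for p in paths if len(p) == 1)
def filesOfB (ps : List (List String)) : List String :=
  ps.filterMap (fun p => match p with | [f] => some f | _ => none)

-- groups[p[0]] = groups.get(p[0], []) + [p[1:]]  (dict → association list, first match,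
-- update in place, new key appended at the end)
def addGroup : List (String × List (List String)) → String → List String →
    List (String × List (List String))
  | [], h, tl => [(h, [tl])]
  | (k, g) :: rest, h, tl =>
    if k = h then (k, g ++ [tl]) :: rest else (k, g) :: addGroup rest h tl

def gstep (gs : List (String × List (List String))) (p : List String) :
    List (String × List (List String)) :=
  match p with
  | h :: t :: r => addGroup gs h (t :: r)
  | _ => gs

def groupsOf (ps : List (List String)) : List (String × List (List String)) :=
  ps.foldl gstep []

-- the trailing file loop: last ⇔ j == len(files) - 1 ⇔ nothing remains
def goFiles : List String → String → List String
  | [], _ => []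
  | f :: rest, pre =>
    (pre ++ (if rest.isEmpty then "└── " else "├── ") ++ f) :: goFiles rest pre

-- termination measures for the mutual recursion below
def mps (ps : List (List String)) : Nat := (ps.map List.length).sum

def gmB (gs : List (String × List (List String))) : Nat :=
  (gs.map (fun e => 1 + mps e.2)).sum

theorem gmB_addGroup (gs : List (String × List (List String))) (h : String) (tl : List String) :
    gmB (addGroup gs h tl) ≤ gmB gs + 1 + tl.length := by
  induction gs with
  | nil => simp [addGroup, gmB, mps]
  | cons e rest ih =>
    obtain ⟨k, g⟩ := e
    by_cases hk : k = h <;> simp [addGroup, hk, gmB, mps] at ih ⊢ <;> omega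

theorem gmB_gstep (gs : List (String × List (List String))) (p : List String) :
    gmB (gstep gs p) ≤ gmB gs + p.length := by
  match p with
  | [] => exact Nat.le_add_right _ _
  | [f] => exact Nat.le_add_right _ _
  | h :: t :: r =>
    have h1 := gmB_addGroup gs h (t :: r)
    simp only [gstep, List.length_cons] at h1 ⊢
    omega

theorem gmB_foldl_gstep : ∀ (ps : List (List String)) (gs : List (String × List (List String))),
    gmB (ps.foldl gstep gs) ≤ gmB gs + mps ps := by
  intro ps
  induction ps with
  | nil => intro gs; simp [mps]
  | cons p ps ih =>
    intro gs
    have h1 := ih (gstep gs p)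
    have h2 := gmB_gstep gs p
    simp only [List.foldl_cons, mps, List.map_cons, List.sum_cons] at h1 ⊢
    omega

theorem gmB_groupsOf (ps : List (List String)) : gmB (groupsOf ps) ≤ mps ps := by
  have := gmB_foldl_gstep ps []
  simpa [groupsOf, gmB] using this

theorem gmB_sorted (gs : List (String × List (List String))) :
    gmB (PySem.List.sorted gs (fun e => e.1) false) = gmB gs :=
  ((PySem.List.sorted_perm gs (fun e => e.1) false).map _).sum_eq

-- render(paths, prefix): group, sort, then one loop over dirs (goDirs) and one over files
-- (goFiles).  `dirs = sorted(groups)` + `groups[d]`: keys are unique, so sorting the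
-- (key, group) pairs by key carries the lookup with the key.  In the dir loop,
-- i == total - 1 ⇔ no dirs remain AND there are no files.
mutual
def renderB : List (List String) → String → List String
  | ps, pre =>
    goDirs (PySem.List.sorted (groupsOf ps) (fun e => e.1) false)
      (PySem.List.sorted (filesOfB ps) (fun f => f) false) pre
  termination_by ps _ => 2 * mps ps + 1
  decreasing_by
    have h1 := gmB_sorted (groupsOf ps)
    have h2 := gmB_groupsOf ps
    omega
def goDirs : List (String × List (List String)) → List String → String → List String
  | [], files, pre => goFiles files pre
  | (d, g) :: rest, files, pre =>
    let isLast := rest.isEmpty && files.isEmpty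
    (pre ++ (if isLast then "└── " else "├── ") ++ d ++ "/")
      :: (renderB g (pre ++ (if isLast then "    " else "│   ")) ++ goDirs rest files pre)
  termination_by gs _ _ => 2 * gmB gs
  decreasing_by
    · simp only [gmB, List.map_cons, List.sum_cons]; omega
    · simp only [gmB, List.map_cons, List.sum_cons]; omega
end

def format_tree_py_alt (root_label : String) (rel_files : List String) : String :=
  PySem.Str.join "\n" ((root_label ++ "/") ::
    renderB ((rel_files.map splitParts).filter (fun q => q ≠ [])) "")

-- ===== PRECONDITION & SPEC =====
def Spec_format_tree_py (root_label : String) (rel_files : List String) (out : String) : Prop := out = format_tree_py_alt root_label rel_files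
instance (root_label : String) (rel_files : List String) (out : String) : Decidable (Spec_format_tree_py root_label rel_files out) := by unfold Spec_format_tree_py; infer_instance

-- ===== CLAIM (what is proved, stated in full; the proofs are below) =====
def Claim_equal_format_tree_py : Prop := ∀ (root_label : String) (rel_files : List String), Dom_format_tree_py root_label rel_files → Spec_format_tree_py root_label rel_files (format_tree_py root_label rel_files)

-- ===== LEMMAS AND PROOFS =====

-- projections of A's tree
def filesP : PTree → List String
  | .mk fs _ => fs

def dirsA : PTree → List (String × PTree)
  | .mk _ es => toAssoc es

def emptyT : PTree := PTree.mk [] PEntries.nil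

-- A's setdef, observed through toAssoc, is an assoc-list first-match update
def updA : List (String × PTree) → String → List String → List (String × PTree)
  | [], h, rest => [(h, addPath emptyT rest)]
  | (k, t) :: es, h, rest =>
    if k = h then (k, addPath t rest) :: es else (k, t) :: updA es h rest

def ustep (l : List (String × PTree)) (p : List String) : List (String × PTree) :=
  match p with
  | h :: t :: r => updA l h (t :: r)
  | _ => l

-- B's group lifted to A's subtree
def liftG (e : String × List (List String)) : String × PTree :=
  (e.1, e.2.foldl addPath emptyT)

theorem toAssoc_setdef (es : PEntries) (h : String) (rest : List String) :
    toAssoc (setdef es h rest) = updA (toAssoc es) h rest :=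
  match es with
  | .nil => by simp [setdef, toAssoc, updA, emptyT]
  | .cons k t es => by
    by_cases hk : k = h <;> simp [setdef, toAssoc, updA, hk, toAssoc_setdef es h rest]
termination_by esize es
decreasing_by simp [esize]

theorem filesP_addPath (t : PTree) (p : List String) :
    filesP (addPath t p) = filesP t ++ (match p with | [f] => [f] | _ => []) := by
  match t, p with
  | .mk fs es, [] => simp [addPath, filesP]
  | .mk fs es, [f] => simp [addPath, filesP]
  | .mk fs es, h :: t' :: r => simp [addPath, filesP]

theorem dirsA_addPath (t : PTree) (p : List String) :
    dirsA (addPath t p) = ustep (dirsA t) p := by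
  match t, p with
  | .mk fs es, [] => simp [addPath, dirsA, ustep]
  | .mk fs es, [f] => simp [addPath, dirsA, ustep]
  | .mk fs es, h :: t' :: r => simp [addPath, dirsA, ustep, toAssoc_setdef]

theorem filesOfB_cons (p : List String) (ps : List (List String)) :
    filesOfB (p :: ps) = (match p with | [f] => [f] | _ => []) ++ filesOfB ps := by
  match p with
  | [] => simp [filesOfB]
  | [f] => simp [filesOfB]
  | a :: b :: r => simp [filesOfB]

theorem filesP_foldl : ∀ (ps : List (List String)) (t : PTree),
    filesP (ps.foldl addPath t) = filesP t ++ filesOfB ps := by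
  intro ps
  induction ps with
  | nil => intro t; simp [filesOfB]
  | cons p ps ih =>
    intro t
    rw [List.foldl_cons, ih, filesP_addPath, filesOfB_cons, List.append_assoc]

theorem dirsA_foldl : ∀ (ps : List (List String)) (t : PTree),
    dirsA (ps.foldl addPath t) = ps.foldl ustep (dirsA t) := by
  intro ps
  induction ps with
  | nil => intro t; rfl
  | cons p ps ih =>
    intro t
    rw [List.foldl_cons, ih, dirsA_addPath, List.foldl_cons]

theorem updA_map (gs : List (String × List (List String))) (h : String) (tl : List String) :
    updA (gs.map liftG) h tl = (addGroup gs h tl).map liftG := by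
  induction gs with
  | nil => simp [updA, addGroup, liftG]
  | cons e rest ih =>
    obtain ⟨k, g⟩ := e
    by_cases hk : k = h <;>
      simp [updA, addGroup, liftG, hk, ih, List.foldl_append]

theorem ustep_map (gs : List (String × List (List String))) (p : List String) :
    ustep (gs.map liftG) p = (gstep gs p).map liftG := by
  match p with
  | [] => rfl
  | [f] => rfl
  | h :: t :: r => simp [ustep, gstep, updA_map]

theorem foldl_ustep_map : ∀ (ps : List (List String)) (gs : List (String × List (List String))),
    ps.foldl ustep (gs.map liftG) = (ps.foldl gstep gs).map liftG := by
  intro ps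
  induction ps with
  | nil => intro gs; rfl
  | cons p ps ih =>
    intro gs
    rw [List.foldl_cons, ustep_map, ih, List.foldl_cons]

theorem filesP_addAll (ps : List (List String)) :
    filesP (ps.foldl addPath emptyT) = filesOfB ps := by
  rw [filesP_foldl]; rfl

theorem dirsA_addAll (ps : List (List String)) :
    dirsA (ps.foldl addPath emptyT) = (groupsOf ps).map liftG := by
  have h0 : dirsA emptyT = ([] : List (String × List (List String))).map liftG := rfl
  rw [dirsA_foldl, h0, foldl_ustep_map, groupsOf]

-- keys of groupsOf are distinct
theorem keys_addGroup (gs : List (String × List (List String))) (h : String) (tl : List String) :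
    (addGroup gs h tl).map Prod.fst =
      if h ∈ gs.map Prod.fst then gs.map Prod.fst else gs.map Prod.fst ++ [h] := by
  induction gs with
  | nil => simp [addGroup]
  | cons e rest ih =>
    obtain ⟨k, g⟩ := e
    by_cases hk : k = h
    · simp [addGroup, hk]
    · have hne : h ≠ k := fun hh => hk hh.symm
      simp only [addGroup, if_neg hk, List.map_cons, ih]
      by_cases hm : h ∈ rest.map Prod.fst
      · simp [hm, hne]
      · simp [hm, hne]

theorem nodup_keys_addGroup (gs : List (String × List (List String))) (h : String)
    (tl : List String) (hnd : (gs.map Prod.fst).Nodup) :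
    ((addGroup gs h tl).map Prod.fst).Nodup := by
  rw [keys_addGroup]
  split_ifs with hmem
  · exact hnd
  · simp [List.nodup_append, hnd]
    intro a x hax ha
    exact hmem (List.mem_map.mpr ⟨(a, x), hax, by simp [ha]⟩)

theorem nodup_keys_gstep (gs : List (String × List (List String))) (p : List String)
    (hnd : (gs.map Prod.fst).Nodup) : ((gstep gs p).map Prod.fst).Nodup := by
  match p with
  | [] => exact hnd
  | [f] => exact hnd
  | h :: t :: r => exact nodup_keys_addGroup gs h (t :: r) hnd

theorem nodup_keys_foldl_gstep : ∀ (ps : List (List String))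
    (gs : List (String × List (List String))), (gs.map Prod.fst).Nodup →
    ((ps.foldl gstep gs).map Prod.fst).Nodup := by
  intro ps
  induction ps with
  | nil => intro gs h; exact h
  | cons p ps ih => intro gs h; exact ih _ (nodup_keys_gstep gs p h)

theorem nodup_keys_groupsOf (ps : List (List String)) :
    ((groupsOf ps).map Prod.fst).Nodup :=
  nodup_keys_foldl_gstep ps [] (by simp)

-- the size bound on a single group, for the fuel induction
theorem mem_groupsOf_mps (ps : List (List String)) (k : String) (g : List (List String))
    (hm : (k, g) ∈ groupsOf ps) : 1 + mps g ≤ mps ps := by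
  have h1 : 1 + mps g ≤ gmB (groupsOf ps) := by
    have : (1 + mps g) ∈ (groupsOf ps).map (fun e => 1 + mps e.2) :=
      List.mem_map.mpr ⟨(k, g), hm, rfl⟩
    exact List.single_le_sum (fun x _ => Nat.zero_le x) _ this
  have h2 := gmB_groupsOf ps
  omega

-- sorting the lifted pairs by key = lifting the sorted pairs (keys are distinct)
theorem sorted_map_liftG (ps : List (List String)) :
    PySem.List.sorted ((groupsOf ps).map liftG) (fun e => e.1) false =
      (PySem.List.sorted (groupsOf ps) (fun e => e.1) false).map liftG := by
  apply PySem.List.sorted_eq_of_perm_of_pairwise_lt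
  · exact (PySem.List.sorted_perm (groupsOf ps) (fun e => e.1) false).map liftG
  · have hle : (PySem.List.sorted (groupsOf ps) (fun e => e.1) false).Pairwise
        (fun a b => a.1 ≤ b.1) :=
      PySem.List.sorted_pairwise (groupsOf ps) (fun e => e.1)
    have hnd : ((PySem.List.sorted (groupsOf ps) (fun e => e.1) false).map Prod.fst).Nodup :=
      ((PySem.List.sorted_perm (groupsOf ps) (fun e => e.1) false).map Prod.fst).nodup_iff.mpr
        (nodup_keys_groupsOf ps)
    have hne : (PySem.List.sorted (groupsOf ps) (fun e => e.1) false).Pairwise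
        (fun a b => a.1 ≠ b.1) := List.pairwise_map.mp hnd
    have hlt : (PySem.List.sorted (groupsOf ps) (fun e => e.1) false).Pairwise
        (fun a b => a.1 < b.1) :=
      (hle.and hne).imp (fun hp => lt_of_le_of_ne hp.1 hp.2)
    have : ∀ (l : List (String × List (List String))), l.Pairwise (fun a b => a.1 < b.1) →
        (l.map liftG).Pairwise (fun a b => a.1 < b.1) := by
      intro l hl
      rw [List.pairwise_map]
      exact hl.imp (fun h => h)
    exact this _ hlt

theorem renderEntries_files (fs : List String) (pre : String) :
    renderEntries (fs.map (fun f => (f, (none : Option PTree)))) pre = goFiles fs pre := by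
  induction fs with
  | nil => simp [renderEntries, goFiles]
  | cons f rest ih =>
    simp only [List.map_cons, renderEntries, goFiles, ih, List.isEmpty_map]
    rfl

-- the enumerate loop over (dirs ++ files) against B's two loops
theorem entries_loop : ∀ (ds : List (String × List (List String))) (fs : List String)
    (pre : String),
    (∀ k g, (k, g) ∈ ds → ∀ pre', renderA (g.foldl addPath emptyT) pre' = renderB g pre') →
    renderEntries (ds.map (fun e => (e.1, some (e.2.foldl addPath emptyT))) ++
      fs.map (fun f => (f, (none : Option PTree)))) pre = goDirs ds fs pre := by
  intro ds
  induction ds with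
  | nil => intro fs pre _; simp [goDirs]; exact renderEntries_files fs pre
  | cons e rest ih =>
    intro fs pre hrec
    obtain ⟨d, g⟩ := e
    have hlast : ((rest.map (fun e => (e.1, some (e.2.foldl addPath emptyT))) ++
        fs.map (fun f => (f, (none : Option PTree)))).isEmpty) =
        (rest.isEmpty && fs.isEmpty) := by
      cases rest <;> cases fs <;> simp
    simp only [List.map_cons, List.cons_append, renderEntries, goDirs, hlast]
    rw [hrec d g List.mem_cons_self, ih fs pre (fun k g' hm => hrec k g' (List.mem_cons_of_mem _ hm))]

theorem renderAB : ∀ (n : Nat) (ps : List (List String)) (pre : String), mps ps ≤ n →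
    renderA (ps.foldl addPath emptyT) pre = renderB ps pre := by
  intro n
  induction n with
  | zero =>
    intro ps pre hn
    have hrec : ∀ k g, (k, g) ∈ PySem.List.sorted (groupsOf ps) (fun e => e.1) false →
        ∀ pre', renderA (g.foldl addPath emptyT) pre' = renderB g pre' := by
      intro k g hm
      have := mem_groupsOf_mps ps k g ((PySem.List.mem_sorted _ _ _ _).mp hm)
      omega
    cases h : ps.foldl addPath emptyT with
    | mk fsr esr =>
      have hf : fsr = filesOfB ps := by
        have := filesP_addAll ps; rw [h] at this; exact this
      have hd : toAssoc esr = (groupsOf ps).map liftG := by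
        have := dirsA_addAll ps; rw [h] at this; exact this
      rw [renderA, renderB, entriesOf, hf, hd, sorted_map_liftG, List.map_map]
      exact entries_loop _ _ pre (fun k g hm pre' => hrec k g hm pre')
  | succ n ihn =>
    intro ps pre hn
    have hrec : ∀ k g, (k, g) ∈ PySem.List.sorted (groupsOf ps) (fun e => e.1) false →
        ∀ pre', renderA (g.foldl addPath emptyT) pre' = renderB g pre' := by
      intro k g hm pre'
      have hle := mem_groupsOf_mps ps k g ((PySem.List.mem_sorted _ _ _ _).mp hm)
      exact ihn g pre' (by omega)
    cases h : ps.foldl addPath emptyT with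
    | mk fsr esr =>
      have hf : fsr = filesOfB ps := by
        have := filesP_addAll ps; rw [h] at this; exact this
      have hd : toAssoc esr = (groupsOf ps).map liftG := by
        have := dirsA_addAll ps; rw [h] at this; exact this
      rw [renderA, renderB, entriesOf, hf, hd, sorted_map_liftG, List.map_map]
      exact entries_loop _ _ pre (fun k g hm pre' => hrec k g hm pre')

theorem buildTree_eq (rels : List String) :
    buildTree rels = ((rels.map splitParts).filter (fun q => q ≠ [])).foldl addPath emptyT := by
  suffices h : ∀ (rels : List String) (t : PTree),
      rels.foldl (fun root rel =>
        let parts := splitParts rel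
        if parts = [] then root else addPath root parts) t =
      ((rels.map splitParts).filter (fun q => q ≠ [])).foldl addPath t by
    exact h rels emptyT
  intro rels
  induction rels with
  | nil => intro t; rfl
  | cons rel rels ih =>
    intro t
    by_cases hp : splitParts rel = [] <;>
      simp [List.foldl_cons, hp, ih]

-- ===== VERDICT (by name: the statement is the Claim_ definition above) =====
theorem format_tree_py_spec : Claim_equal_format_tree_py := by
  intro root_label rel_files _
  unfold Spec_format_tree_py format_tree_py format_tree_py_alt
  show PySem.Str.join "\n" ((root_label ++ "/") :: renderA (buildTree rel_files) "")
      = PySem.Str.join "\n" ((root_label ++ "/") ::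
        renderB ((rel_files.map splitParts).filter (fun q => q ≠ [])) "")
  rw [buildTree_eq, renderAB (mps ((rel_files.map splitParts).filter (fun q => q ≠ [])))
    ((rel_files.map splitParts).filter (fun q => q ≠ [])) "" (le_refl _)]
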